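-- pv_equiv track=rewrite | github.com/LHaoRax/2019autumn_interview | 2019autumn_interview/2.27/KMP.py | next_KMP
-- ===== SOURCE A (Python) =====
-- def next_KMP(model_str):
--     next_list = list(range(len(model_str)))
--
--     for i in range(len(model_str)):
--         j = i
--         while model_str[:j] != model_str[i + 1 - j:i + 1] and j > 0:
--             j -= 1
--         next_list[i] = j
--
--     ret_list = next_list[:-1]
--     ret_list.insert(0, -1)
--     return ret_list
-- ===== SOURCE B (Python) =====
-- def next_KMP(model_str):
--     # Standard linear KMP prefix-function computation (one pass with fallback links)
--     if not model_str:
--         return [-1]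
--     pi = [0]
--     k = 0
--     for ch in model_str[1:]:
--         while k and model_str[k] != ch:
--             k = pi[k - 1]
--         if model_str[k] == ch:
--             k += 1
--         pi.append(k)
--     return [-1] + pi[:-1]
-- ===== Notes on version B (the rewrite author's own statement) =====
-- stated objective: faster
-- what changed: Replaced the per-position decreasing scan with quadratic slice comparisons (O(n^3) overall) by the standard one-pass linear KMP prefix-function computation with fallback links.
import Mathlib
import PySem

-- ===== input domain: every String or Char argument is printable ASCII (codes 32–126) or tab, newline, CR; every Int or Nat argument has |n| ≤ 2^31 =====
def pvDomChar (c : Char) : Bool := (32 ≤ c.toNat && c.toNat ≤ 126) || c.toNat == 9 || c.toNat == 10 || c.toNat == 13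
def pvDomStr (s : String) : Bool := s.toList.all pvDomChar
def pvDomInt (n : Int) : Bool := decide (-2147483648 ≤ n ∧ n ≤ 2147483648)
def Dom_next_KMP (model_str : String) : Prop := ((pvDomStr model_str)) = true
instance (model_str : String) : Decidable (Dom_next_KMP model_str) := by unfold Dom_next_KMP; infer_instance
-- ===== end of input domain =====

-- B replaces A's cubic per-position slice-comparison search by the linear KMP prefix-function loop (objective: faster, asymptotic).

-- ===== PORT A =====
-- inner 'while model_str[:j] != model_str[i+1-j:i+1] and j > 0: j -= 1', recursion on j
def pvAInner (s : List Char) (i : Nat) : Nat → Nat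
  | 0 => 0
  | j + 1 =>
    if PySem.List.slice s none (some ((j : Int) + 1)) ≠
        PySem.List.slice s (some ((i : Int) + 1 - ((j : Int) + 1))) (some ((i : Int) + 1)) then
      pvAInner s i j
    else j + 1

def next_KMP (model_str : String) : List Int :=
  let s := model_str.toList
  -- next_list[i] = final j of the inner while loop started at j = i
  let next_list : List Int := (List.range s.length).map (fun i => (pvAInner s i i : Int))
  let ret_list := PySem.List.slice next_list none (some (-1))   -- next_list[:-1]
  PySem.List.insert ret_list 0 (-1)                             -- ret_list.insert(0, -1)

-- ===== PORT B =====
-- 'while k and model_str[k] != ch: k = pi[k-1]'; fuel = initial k (each step strictly decreases k)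
def pvKmpLoop (s : List Char) (pi : List Nat) (ch : Char) : Nat → Nat → Nat
  | _, 0 => 0
  | 0, k + 1 => k + 1
  | fuel + 1, k + 1 =>
    if s.getD (k + 1) ' ' ≠ ch then pvKmpLoop s pi ch fuel (pi.getD k 0) else k + 1

def pvBStep (s : List Char) (st : List Nat × Nat) (ch : Char) : List Nat × Nat :=
  let k1 := pvKmpLoop s st.1 ch st.2 st.2
  let k2 := if s.getD k1 ' ' = ch then k1 + 1 else k1
  (st.1 ++ [k2], k2)

def next_KMP_alt (model_str : String) : List Int :=
  let s := model_str.toList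
  match s with
  | [] => [-1]
  | _ :: _ =>
    let r := (s.drop 1).foldl (pvBStep s) ([0], 0)
    (-1) :: (r.1.dropLast.map (fun n => Int.ofNat n))

-- ===== PRECONDITION & SPEC =====
def Spec_next_KMP (model_str : String) (out : List Int) : Prop := out = next_KMP_alt model_str
instance (model_str : String) (out : List Int) : Decidable (Spec_next_KMP model_str out) := by unfold Spec_next_KMP; infer_instance

-- ===== CLAIM (what is proved, stated in full; the proofs are below) =====
def Claim_equal_next_KMP : Prop := ∀ (model_str : String), Dom_next_KMP model_str → Spec_next_KMP model_str (next_KMP model_str)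

-- ===== LEMMAS AND PROOFS =====

-- j is a border length of the prefix s[0..i]: s[:j] == s[i+1-j:i+1]
abbrev pvBrd (s : List Char) (i j : Nat) : Prop :=
  j ≤ i ∧ ∀ t, t < j → s.getD t ' ' = s.getD (i + 1 - j + t) ' '

def pvMaxB (s : List Char) (i : Nat) : Nat := Nat.findGreatest (pvBrd s i) i

-- pvBrd s i j: j is a border length of the prefix s[0..i]; pvMaxB its maximum.
theorem pvBrd_zero (s : List Char) (i : Nat) : pvBrd s i 0 :=
  ⟨Nat.zero_le i, fun t ht => absurd ht (Nat.not_lt_zero t)⟩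

theorem pvBrd_ext (s : List Char) (i j : Nat) :
    pvBrd s (i+1) (j+1) ↔ (pvBrd s i j ∧ s.getD j ' ' = s.getD (i+1) ' ') := by
  constructor
  · rintro ⟨hle, h⟩
    have hji : j ≤ i := by omega
    refine ⟨⟨hji, fun t ht => ?_⟩, ?_⟩
    · have h1 := h t (by omega)
      have e : i + 1 + 1 - (j + 1) + t = i + 1 - j + t := by omega
      rwa [e] at h1
    · have h1 := h j (by omega)
      have e : i + 1 + 1 - (j + 1) + j = i + 1 := by omega
      rwa [e] at h1
  · rintro ⟨⟨hji, h⟩, hc⟩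
    refine ⟨by omega, fun t ht => ?_⟩
    have e : i + 1 + 1 - (j + 1) + t = i + 1 - j + t := by omega
    rw [e]
    rcases Nat.lt_or_ge t j with h' | h'
    · exact h t h'
    · have ht' : t = j := by omega
      subst ht'
      have e2 : i + 1 - t + t = i + 1 := by omega
      rw [e2]; exact hc

theorem pvBrd_trans (s : List Char) (i m j : Nat)
    (h1 : pvBrd s i (m+1)) (h2 : pvBrd s m j) : pvBrd s i j := by
  obtain ⟨hm, H1⟩ := h1
  obtain ⟨hj, H2⟩ := h2
  refine ⟨by omega, fun t ht => ?_⟩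
  have e2 := H1 (m + 1 - j + t) (by omega)
  have e : i + 1 - (m+1) + (m + 1 - j + t) = i + 1 - j + t := by omega
  rw [e] at e2
  rw [H2 t ht, e2]

theorem pvBrd_chain (s : List Char) (i m j : Nat)
    (h1 : pvBrd s i (m+1)) (h2 : pvBrd s i j) (hlt : j < m + 1) : pvBrd s m j := by
  obtain ⟨hm, H1⟩ := h1
  obtain ⟨hj, H2⟩ := h2
  refine ⟨by omega, fun t ht => ?_⟩
  have e2 := H1 (m + 1 - j + t) (by omega)
  have e : i + 1 - (m+1) + (m + 1 - j + t) = i + 1 - j + t := by omega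
  rw [e] at e2
  rw [H2 t ht, ← e2]

theorem pvMaxB_spec (s : List Char) (i : Nat) : pvBrd s i (pvMaxB s i) :=
  Nat.findGreatest_spec (Nat.zero_le i) (pvBrd_zero s i)

theorem pvMaxB_le (s : List Char) (i : Nat) : pvMaxB s i ≤ i := Nat.findGreatest_le i

theorem pvLe_maxB (s : List Char) (i j : Nat) (h : pvBrd s i j) : j ≤ pvMaxB s i :=
  Nat.le_findGreatest h.1 h

-- the bound carried through the fallback loop: no border of s[0..i+1] is longer than k+1
theorem pvBound_init (s : List Char) (i : Nat) :
    ∀ m, pvBrd s (i+1) m → m ≤ pvMaxB s i + 1 := by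
  intro m hm
  match m with
  | 0 => omega
  | j + 1 =>
    have hj := ((pvBrd_ext s i j).mp hm).1
    have := pvLe_maxB s i j hj
    omega

-- A's slice comparison, reduced to a pointwise condition
theorem pvSlice_iff (s : List Char) (i jj : Nat) (hi : i < s.length) (hj : jj ≤ i) :
    (PySem.List.slice s none (some (jj : Int)) =
      PySem.List.slice s (some ((i:Int)+1-(jj:Int))) (some ((i:Int)+1))) ↔
    (∀ t, t < jj → s.getD t ' ' = s.getD (i+1-jj+t) ' ') := by
  have ha : (i:Int)+1-(jj:Int) = ((i+1-jj : Nat) : Int) := by omega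
  have hb : (i:Int)+1 = ((i+1 : Nat) : Int) := by omega
  rw [ha, hb, PySem.List.slice_to_natCast, PySem.List.slice_natCast]
  have hsub : (i+1) - (i+1-jj) = jj := by omega
  rw [hsub]
  constructor
  · intro h t ht
    have h1 := congrArg (fun l => l[t]?) h
    simp only [List.getElem?_take, List.getElem?_drop, ht, if_pos] at h1
    have htn : t < s.length := by omega
    have htn2 : i + 1 - jj + t < s.length := by omega
    simp [List.getD_eq_getElem?_getD, List.getElem?_eq_getElem htn,
      List.getElem?_eq_getElem htn2] at h1 ⊢
    exact h1
  · intro h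
    refine List.ext_getElem? fun t => ?_
    by_cases ht : t < jj
    · have htn : t < s.length := by omega
      have htn2 : i + 1 - jj + t < s.length := by omega
      have h1 := h t ht
      simp [List.getD_eq_getElem?_getD, List.getElem?_eq_getElem htn,
        List.getElem?_eq_getElem htn2] at h1
      simp [List.getElem?_drop, ht,
        List.getElem?_eq_getElem htn, List.getElem?_eq_getElem htn2, h1]
    · have l1 : (s.take jj).length ≤ t := by
        simp [List.length_take]; omega
      have l2 : (((s.drop (i+1-jj)).take jj)).length ≤ t := by
        simp [List.length_take]; omega
      rw [List.getElem?_eq_none l1, List.getElem?_eq_none l2]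

theorem pvAInner_eq (s : List Char) (i : Nat) (hi : i < s.length) :
    ∀ j, j ≤ i → pvAInner s i j = Nat.findGreatest (pvBrd s i) j := by
  intro j
  induction j with
  | zero => intro _; rfl
  | succ j ih =>
    intro hj
    rw [Nat.findGreatest_succ]
    show (if _ ≠ _ then pvAInner s i j else j + 1) = _
    have hc : ((j : Int) + 1) = (((j+1 : Nat)) : Int) := by push_cast; ring
    rw [hc]
    have hiff := pvSlice_iff s i (j+1) hi hj
    by_cases hP : pvBrd s i (j+1)
    · rw [if_neg (by simpa using hiff.mpr hP.2), if_pos hP]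
    · have hne : ¬ (∀ t, t < j+1 → s.getD t ' ' = s.getD (i+1-(j+1)+t) ' ') :=
        fun hh => hP ⟨hj, hh⟩
      rw [if_pos (by simpa using (fun he => hne (hiff.mp he))), if_neg hP]
      exact ih (by omega)

theorem pvStep_correct (s : List Char) (i : Nat) (pi : List Nat)
    (hpi : ∀ m, m ≤ i → pi.getD m 0 = pvMaxB s m) :
    ∀ k fuel, k ≤ fuel → pvBrd s i k →
      (∀ m, pvBrd s (i+1) m → m ≤ k + 1) →
      ((if s.getD (pvKmpLoop s pi (s.getD (i+1) ' ') fuel k) ' ' = s.getD (i+1) ' '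
        then pvKmpLoop s pi (s.getD (i+1) ' ') fuel k + 1
        else pvKmpLoop s pi (s.getD (i+1) ' ') fuel k) = pvMaxB s (i+1)) := by
  intro k
  induction k using Nat.strong_induction_on with
  | _ k IH =>
    intro fuel hfuel hk hbound
    match k, hfuel, hk, hbound with
    | 0, hfuel, hk, hbound =>
      have hl : pvKmpLoop s pi (s.getD (i+1) ' ') fuel 0 = 0 := by
        cases fuel <;> rfl
      rw [hl]
      by_cases h0 : s.getD 0 ' ' = s.getD (i+1) ' '
      · rw [if_pos h0]
        have hb1 : pvBrd s (i+1) 1 := (pvBrd_ext s i 0).mpr ⟨pvBrd_zero s i, h0⟩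
        have hle := pvLe_maxB s (i+1) 1 hb1
        have hge := hbound _ (pvMaxB_spec s (i+1))
        omega
      · rw [if_neg h0]
        symm
        rw [pvMaxB]
        rw [Nat.findGreatest_eq_zero_iff]
        intro m hm hle hP
        have h1 := hbound m hP
        have hm1 : m = 1 := by omega
        subst hm1
        exact h0 ((pvBrd_ext s i 0).mp hP).2
    | (m+1), hfuel, hk, hbound =>
      match fuel, hfuel with
      | (f+1), hfuel =>
        by_cases hmc : s.getD (m+1) ' ' = s.getD (i+1) ' '
        · have hl : pvKmpLoop s pi (s.getD (i+1) ' ') (f+1) (m+1) = m + 1 := by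
            show (if _ ≠ _ then _ else _) = _
            rw [if_neg (by simpa using hmc)]
          rw [hl, if_pos hmc]
          have hb : pvBrd s (i+1) (m+2) := (pvBrd_ext s i (m+1)).mpr ⟨hk, hmc⟩
          have hle := pvLe_maxB s (i+1) (m+2) hb
          have hge := hbound _ (pvMaxB_spec s (i+1))
          omega
        · have hl : pvKmpLoop s pi (s.getD (i+1) ' ') (f+1) (m+1) =
              pvKmpLoop s pi (s.getD (i+1) ' ') f (pi.getD m 0) := by
            show (if _ ≠ _ then _ else _) = _
            rw [if_pos (by simpa using hmc)]
          rw [hl]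
          have hmi : m + 1 ≤ i := hk.1
          have hpim : pi.getD m 0 = pvMaxB s m := hpi m (by omega)
          have hk'le : pi.getD m 0 ≤ m := by rw [hpim]; exact pvMaxB_le s m
          have hbrd' : pvBrd s i (pi.getD m 0) := by
            rw [hpim]
            exact pvBrd_trans s i m _ hk (pvMaxB_spec s m)
          have hbound' : ∀ mm, pvBrd s (i+1) mm → mm ≤ pi.getD m 0 + 1 := by
            intro mm hmm
            match mm with
            | 0 => omega
            | j + 1 =>
              obtain ⟨hbj, hcj⟩ := (pvBrd_ext s i j).mp hmm
              have hub := hbound _ hmm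
              have hjne : j ≠ m + 1 := fun he => hmc (he ▸ hcj)
              have hjlt : j < m + 1 := by omega
              have hcha := pvBrd_chain s i m j hk hbj hjlt
              have := pvLe_maxB s m j hcha
              omega
          exact IH (pi.getD m 0) (by omega) f (by omega) hbrd' hbound'

theorem pvGetD_map_range {α : Type} (f : Nat → α) (d : α) (m j : Nat) (hj : j < m) :
    ((List.range m).map f).getD j d = f j := by
  simp [List.getD_eq_getElem?_getD, hj]

theorem pvFold_inv (s : List Char) (h0 : 0 < s.length) :
    ∀ m, m ≤ s.length - 1 →
      ((s.drop 1).take m).foldl (pvBStep s) ([0], 0) =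
        ((List.range (m+1)).map (pvMaxB s), pvMaxB s m) := by
  intro m
  induction m with
  | zero =>
    intro _
    have h00 : pvMaxB s 0 = 0 := Nat.le_zero.mp (pvMaxB_le s 0)
    simp [List.range_succ, h00]
  | succ m ih =>
    intro hm
    have hlen : m < (s.drop 1).length := by simp; omega
    have hm1 : m + 1 < s.length := by omega
    rw [List.take_add_one, List.getElem?_eq_getElem hlen, List.foldl_append,
      ih (by omega)]
    have hch : (s.drop 1)[m] = s.getD (m+1) ' ' := by
      rw [List.getElem_drop, List.getD_eq_getElem s ' ' hm1]
      congr 1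
      omega
    simp only [Option.toList_some, List.foldl_cons, List.foldl_nil, hch]
    have hstep := pvStep_correct s m ((List.range (m+1)).map (pvMaxB s))
      (fun j hj => pvGetD_map_range (pvMaxB s) 0 (m+1) j (by omega))
      (pvMaxB s m) (pvMaxB s m) le_rfl (pvMaxB_spec s m) (pvBound_init s m)
    show ((List.range (m+1)).map (pvMaxB s) ++ [_], _) = _
    rw [hstep]
    simp [List.range_succ]

theorem next_KMP_spec : Claim_equal_next_KMP := by
  unfold Claim_equal_next_KMP
  intro ms _
  unfold Spec_next_KMP next_KMP next_KMP_alt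
  cases ms.toList with
  | nil =>
    simp [PySem.List.slice_to_neg_one, PySem.List.insert_zero]
  | cons a t =>
    simp only []
    have hmap : (List.range (a :: t).length).map (fun i => ((pvAInner (a :: t) i i : Nat) : Int)) =
        (List.range (a :: t).length).map (fun i => ((pvMaxB (a :: t) i : Nat) : Int)) := by
      apply List.map_congr_left
      intro i hi
      rw [List.mem_range] at hi
      rw [pvAInner_eq (a :: t) i hi i le_rfl]
      rfl
    rw [hmap]
    have hfold : ((a :: t).drop 1).foldl (pvBStep (a :: t)) ([0], 0) =
        ((List.range (a :: t).length).map (pvMaxB (a :: t)), pvMaxB (a :: t) ((a :: t).length - 1)) := by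
      have htake : ((a :: t).drop 1).take ((a :: t).length - 1) = (a :: t).drop 1 := by
        apply List.take_of_length_le
        simp
      rw [← htake, pvFold_inv (a :: t) (by simp) ((a :: t).length - 1) le_rfl]
      simp
    rw [hfold]
    rw [PySem.List.slice_to_neg_one, PySem.List.insert_zero]
    simp only [List.map_dropLast, List.map_map]
    rfl
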